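-- pv_equiv track=rewrite | github.com/edsonalbjr/Pelada100Pressao | Sorteio Times Futebol/Versão 6.0/listar_jogadores_por_estrelas.py | agrupar_por_estrelas
-- ===== SOURCE A (Python) =====
-- def agrupar_por_estrelas(jogadores):
--     """
--     Agrupa jogadores por número de estrelas.
--     Retorna um dicionário onde a chave é o número de estrelas e o valor é a lista de jogadores.
--     """
--     grupos = {}
--     for jogador in jogadores:
--         estrelas = jogador['habilidade']
--         if estrelas not in grupos:
--             grupos[estrelas] = []
--         grupos[estrelas].append(jogador)
--     return dict(sorted(grupos.items(), reverse=True))  # Ordena por estrelas (decrescente)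
-- ===== SOURCE B (Python) =====
-- def agrupar_por_estrelas(jogadores):
--     """
--     Agrupa jogadores por número de estrelas.
--     Retorna um dicionário onde a chave é o número de estrelas e o valor é a lista de jogadores.
--     """
--     estrelas_distintas = sorted({jogador['habilidade'] for jogador in jogadores}, reverse=True)
--     return {e: [j for j in jogadores if j['habilidade'] == e] for e in estrelas_distintas}
-- ===== Notes on version B (the rewrite author's own statement) =====
-- stated objective: simpler
-- what changed: B replaces A's incremental bucket-dict build followed by sorting the items with: collect the distinct star values, sort them descending once, then build each group directly by filtering the player list.
import Mathlib
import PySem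

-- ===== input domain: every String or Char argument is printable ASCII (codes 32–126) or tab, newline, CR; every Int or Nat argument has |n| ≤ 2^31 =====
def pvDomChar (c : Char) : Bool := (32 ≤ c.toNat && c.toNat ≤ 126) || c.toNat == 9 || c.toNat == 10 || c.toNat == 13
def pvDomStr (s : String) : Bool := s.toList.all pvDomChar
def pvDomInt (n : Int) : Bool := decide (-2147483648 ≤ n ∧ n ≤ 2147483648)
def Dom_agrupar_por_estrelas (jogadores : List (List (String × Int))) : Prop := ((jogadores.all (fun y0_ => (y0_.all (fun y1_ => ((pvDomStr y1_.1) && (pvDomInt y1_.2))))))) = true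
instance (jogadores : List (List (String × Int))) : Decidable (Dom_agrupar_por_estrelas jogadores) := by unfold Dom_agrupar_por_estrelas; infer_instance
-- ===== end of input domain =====

-- B replaces A's incremental bucket-dict + item sort with "sort the distinct star values descending,
-- then build each group by filtering the player list" — a simpler two-pass decomposition, not faster.


-- jogador['habilidade']: first-match dict lookup; none (Python KeyError) is excluded by Pre_, so .getD 0 is never the KeyError case inside Pre_.
def pvHab (jogador : List (String × Int)) : Int :=
  ((PySem.Dict.mk jogador).get? "habilidade").getD 0

-- ===== PORT A =====
-- Python's sorted compares the (int, list) item tuples; dict keys are distinct so only the int is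
-- ever compared — key p.1 is exact here.
def agrupar_por_estrelas (jogadores : List (List (String × Int))) : List (Int × List (List (String × Int))) :=
  let grupos : PySem.Dict Int (List (List (String × Int))) :=
    jogadores.foldl (fun grupos jogador =>
      let estrelas := pvHab jogador
      let grupos := if grupos.contains estrelas then grupos else grupos.insert estrelas []
      grupos.insert estrelas (grupos.getD estrelas [] ++ [jogador])) PySem.Dict.empty
  PySem.List.sorted grupos.items (fun p => p.1) true

-- ===== PORT B =====
def agrupar_por_estrelas_alt (jogadores : List (List (String × Int))) : List (Int × List (List (String × Int))) :=
  let estrelas_distintas :=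
    PySem.List.sorted (PySem.Set.ofList (jogadores.map (fun j => pvHab j))) (fun e => e) true
  estrelas_distintas.map (fun e => (e, jogadores.filter (fun j => pvHab j == e)))

-- ===== PRECONDITION & SPEC =====
-- Pre_ excludes exactly the inputs where some player lacks the 'habilidade' key, on which the Python A raises KeyError.
def Pre_agrupar_por_estrelas (jogadores : List (List (String × Int))) : Prop :=
  (jogadores.all (fun j => j.any (fun p => p.1 == "habilidade"))) = true
instance (jogadores : List (List (String × Int))) : Decidable (Pre_agrupar_por_estrelas jogadores) := by unfold Pre_agrupar_por_estrelas; infer_instance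
def pvWitness_agrupar_por_estrelas : (List (List (String × Int))) :=
  [[("habilidade", 3), ("nome", 0)], [("habilidade", 1)], [("habilidade", 3)]]

def Spec_agrupar_por_estrelas (jogadores : List (List (String × Int))) (out : List (Int × List (List (String × Int)))) : Prop := out = agrupar_por_estrelas_alt jogadores
instance (jogadores : List (List (String × Int))) (out : List (Int × List (List (String × Int)))) : Decidable (Spec_agrupar_por_estrelas jogadores out) := by unfold Spec_agrupar_por_estrelas; infer_instance

-- ===== CLAIM (what is proved, stated in full; the proofs are below) =====
def Claim_equal_agrupar_por_estrelas : Prop := ∀ (jogadores : List (List (String × Int))), Dom_agrupar_por_estrelas jogadores → Pre_agrupar_por_estrelas jogadores → Spec_agrupar_por_estrelas jogadores (agrupar_por_estrelas jogadores)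

-- ===== LEMMAS AND PROOFS =====

-- A's loop body is exactly d[estrelas] = d.get(estrelas, []) + [jogador], i.e. Dict.modify.
theorem pv_step_eq (g : PySem.Dict Int (List (List (String × Int)))) (j : List (String × Int)) :
    (let estrelas := pvHab j
     let g1 := if g.contains estrelas then g else g.insert estrelas []
     g1.insert estrelas (g1.getD estrelas [] ++ [j]))
    = g.modify (pvHab j) [] (· ++ [j]) := by
  by_cases h : g.contains (pvHab j) = true
  · simp [h, PySem.Dict.modify]
  · have h' : g.contains (pvHab j) = false := by simpa using h
    have hfind : List.find? (fun p => p.1 == pvHab j) g.items = none := by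
      have hh := h'
      rw [PySem.Dict.contains_eq_isSome_get?] at hh
      simpa [PySem.Dict.get?] using hh
    have hnomem := List.find?_eq_none.mp hfind
    have hc2 : (g.insert (pvHab j) []).contains (pvHab j) = true :=
      PySem.Dict.contains_insert_self _ _ _
    simp only [h', Bool.false_eq_true, if_false]
    simp only [PySem.Dict.modify, PySem.Dict.getD_insert_self,
      PySem.Dict.getD_of_not_contains _ _ h', List.nil_append]
    apply PySem.Dict.ext
    rw [PySem.Dict.items_insert_of_contains _ _ hc2,
        PySem.Dict.items_insert_of_not_contains _ _ h',
        PySem.Dict.items_insert_of_not_contains _ _ h',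
        List.map_append]
    congr 1
    · conv_rhs => rw [← List.map_id g.items]
      exact List.map_congr_left (fun p hp => by
        have hne : (p.1 == pvHab j) = false := by simpa using hnomem p hp
        simp [hne])
    · simp

-- a dict with Nodup keys is its key list paired with the looked-up values
theorem pv_items_eq_keys_map {V : Type} (l : List (Int × V)) (dflt : V)
    (h : (l.map Prod.fst).Nodup) :
    l = (l.map Prod.fst).map (fun k => (k, (PySem.Dict.mk l).getD k dflt)) := by
  induction l with
  | nil => rfl
  | cons p rest ih =>
    obtain ⟨a, v⟩ := p
    simp only [List.map_cons, List.nodup_cons] at h ⊢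
    congr 1
    · simp [PySem.Dict.getD, PySem.Dict.get?_mk_cons]
    · have hrest := ih h.2
      conv_lhs => rw [hrest]
      apply List.map_congr_left
      intro k hk
      have hne : a ≠ k := fun he => h.1 (he ▸ hk)
      simp [PySem.Dict.getD, PySem.Dict.get?_mk_cons, hne]

theorem agrupar_eq_canonical (jogadores : List (List (String × Int))) :
    agrupar_por_estrelas jogadores = agrupar_por_estrelas_alt jogadores := by
  unfold agrupar_por_estrelas agrupar_por_estrelas_alt
  dsimp only
  have hfold :
      (jogadores.foldl (fun grupos jogador =>
        let estrelas := pvHab jogador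
        let grupos := if grupos.contains estrelas then grupos else grupos.insert estrelas []
        grupos.insert estrelas (grupos.getD estrelas [] ++ [jogador])) PySem.Dict.empty)
      = jogadores.foldl (fun d j => d.modify (pvHab j) [] (· ++ [j])) PySem.Dict.empty := by
    congr 1
    funext g j
    exact pv_step_eq g j
  rw [hfold]
  set d := jogadores.foldl (fun d j => d.modify (pvHab j) [] (· ++ [j])) PySem.Dict.empty with hd
  -- keys of the grouping fold
  have hkeys : d.keys = PySem.Set.ofList (jogadores.map (fun j => pvHab j)) := by
    rw [hd, PySem.Dict.keys_foldl_modify_key jogadores (fun j => pvHab j) []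
          (fun _ j v => v ++ [j]) PySem.Dict.empty, PySem.Dict.keys_empty]
    rfl
  have hnodup : d.keys.Nodup := by
    rw [hkeys]; exact PySem.Set.nodup_ofList _
  -- values of the grouping fold
  have hgetD : ∀ c, d.getD c [] = jogadores.filter (fun j => pvHab j == c) := by
    intro c
    have hm : d = List.foldl (fun d p => d.modify p.1 [] (· ++ [p.2])) PySem.Dict.empty
        (jogadores.map (fun j => (pvHab j, j))) := by
      rw [hd, List.foldl_map]
    rw [hm, PySem.Dict.getD_foldl_modify_append]
    simp [List.filter_map, Function.comp_def]
  -- the dict's items listed canonically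
  have hitems : d.items = (PySem.Set.ofList (jogadores.map (fun j => pvHab j))).map
      (fun k => (k, jogadores.filter (fun j => pvHab j == k))) := by
    have h0 := pv_items_eq_keys_map d.items ([] : List (List (String × Int)))
      (by simpa [PySem.Dict.keys] using hnodup)
    have hmk : PySem.Dict.mk d.items = d := rfl
    rw [hmk] at h0
    conv_lhs => rw [h0]
    have : d.items.map Prod.fst = d.keys := rfl
    rw [this, hkeys]
    exact List.map_congr_left (fun k _ => by rw [hgetD k])
  rw [hitems]
  -- sorting the items by key descending is the map over the descending distinct keys
  apply PySem.List.sorted_rev_eq_of_perm_of_pairwise_gt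
  · exact List.Perm.map _ (PySem.List.sorted_perm _ _ _)
  · rw [List.pairwise_map]
    have hle := PySem.List.sorted_pairwise_rev
      (PySem.Set.ofList (jogadores.map (fun j => pvHab j))) (fun e => e)
    have hnd : (PySem.List.sorted (PySem.Set.ofList (jogadores.map (fun j => pvHab j)))
        (fun e => e) true).Nodup :=
      ((PySem.List.sorted_perm _ _ _).nodup_iff).mpr (PySem.Set.nodup_ofList _)
    exact (hle.and hnd).imp (fun {a b} hab => lt_of_le_of_ne hab.1 (Ne.symm hab.2))

-- ===== VERDICT (by name: the statement is the Claim_ definition above) =====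
theorem agrupar_por_estrelas_spec : Claim_equal_agrupar_por_estrelas := by
  intro jogadores _ _
  unfold Spec_agrupar_por_estrelas
  exact agrupar_eq_canonical jogadores
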